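-- pv_equiv track=rewrite | github.com/aunraza19/LungsCareAI | rag.py | _make_clinical
-- ===== SOURCE A (Python) =====
-- def _make_clinical(text):
--     """Convert conversational text to clinical language"""
--     # Replace conversational phrases with clinical alternatives
--     replacements = {
--         "you should": "it is recommended to",
--         "You should": "It is recommended to",
--         "you need": "the patient requires",
--         "You need": "The patient requires",
--         "your doctor": "the treating physician",
--         "Your doctor": "The treating physician",
--         "your lungs": "the patient's lungs",
--         "Your lungs": "The patient's lungs",
--         "you have": "the patient has",
--         "You have": "The patient has",
--         "you are": "the patient is",
--         "You are": "The patient is",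
--         "Great news!": "Findings:",
--         "Good news!": "Findings:",
--         "I recommend": "It is recommended",
--         "I suggest": "It is suggested",
--     }
--     for old, new in replacements.items():
--         text = text.replace(old, new)
--     return text
-- ===== SOURCE B (Python) =====
-- import re
--
-- _REPLACEMENTS = {
--     "you should": "it is recommended to",
--     "You should": "It is recommended to",
--     "you need": "the patient requires",
--     "You need": "The patient requires",
--     "your doctor": "the treating physician",
--     "Your doctor": "The treating physician",
--     "your lungs": "the patient's lungs",
--     "Your lungs": "The patient's lungs",
--     "you have": "the patient has",
--     "You have": "The patient has",
--     "you are": "the patient is",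
--     "You are": "The patient is",
--     "Great news!": "Findings:",
--     "Good news!": "Findings:",
--     "I recommend": "It is recommended",
--     "I suggest": "It is suggested",
-- }
--
-- _PATTERN = re.compile("|".join(re.escape(k) for k in _REPLACEMENTS))
--
--
-- def _make_clinical(text):
--     """Convert conversational text to clinical language"""
--     # One left-to-right pass replacing every phrase of the input simultaneously.
--     return _PATTERN.sub(lambda m: _REPLACEMENTS[m.group(0)], text)
-- ===== Notes on version B (the rewrite author's own statement) =====
-- stated objective: idiomatic
-- what changed: Replaced 16 sequential whole-string str.replace passes by one precompiled alternation regex applied in a single left-to-right re.sub pass with a dict-lookup callback.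
-- intended difference: On texts containing 'I sugges' immediately followed by one of 'you need', 'your doctor', 'your lungs', 'you have' or 'you are', A's later 'I suggest' pass re-replaces text produced by an earlier replacement (e.g. 'I suggesyou need' -> 'It is suggestedhe patient requires'), while B replaces only phrases present in the input ('I suggesthe patient requires'); B's is intended because substituting into already-substituted output is an accident of the sequential passes. — e.g. on _make_clinical("I suggesyou need"): A returns "It is suggestedhe patient requires", B returns "I suggesthe patient requires"
import Mathlib
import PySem

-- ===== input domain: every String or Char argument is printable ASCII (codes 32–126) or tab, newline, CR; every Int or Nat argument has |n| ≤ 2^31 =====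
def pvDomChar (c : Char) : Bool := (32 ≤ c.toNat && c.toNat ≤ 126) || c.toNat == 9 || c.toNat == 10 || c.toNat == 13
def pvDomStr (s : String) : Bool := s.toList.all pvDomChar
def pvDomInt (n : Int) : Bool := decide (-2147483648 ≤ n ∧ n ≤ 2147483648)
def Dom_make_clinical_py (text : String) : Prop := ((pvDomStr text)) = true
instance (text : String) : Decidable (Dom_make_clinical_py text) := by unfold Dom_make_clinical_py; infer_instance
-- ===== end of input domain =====

-- B replaces A's 16 sequential str.replace passes by one simultaneous left-to-right scan
-- (a combined-alternation regex in Python); equal except on the stated chain inputs (D_ below).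

-- ===== PORT A =====
-- the dict literal of A; .items() iterates in insertion order
def pvPairs : List (String × String) :=
  [("you should", "it is recommended to"),
   ("You should", "It is recommended to"),
   ("you need", "the patient requires"),
   ("You need", "The patient requires"),
   ("your doctor", "the treating physician"),
   ("Your doctor", "The treating physician"),
   ("your lungs", "the patient's lungs"),
   ("Your lungs", "The patient's lungs"),
   ("you have", "the patient has"),
   ("You have", "The patient has"),
   ("you are", "the patient is"),
   ("You are", "The patient is"),
   ("Great news!", "Findings:"),
   ("Good news!", "Findings:"),
   ("I recommend", "It is recommended"),
   ("I suggest", "It is suggested")]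

def make_clinical_py (text : String) : String :=
  pvPairs.foldl (fun t p => PySem.Str.replace t p.1 p.2) text

-- ===== PORT B =====
-- B's replacement table (the dict of Source B), on code-point lists
def pvPairsAlt : List (List Char × List Char) :=
  [("you should".toList, "it is recommended to".toList),
   ("You should".toList, "It is recommended to".toList),
   ("you need".toList, "the patient requires".toList),
   ("You need".toList, "The patient requires".toList),
   ("your doctor".toList, "the treating physician".toList),
   ("Your doctor".toList, "The treating physician".toList),
   ("your lungs".toList, "the patient's lungs".toList),
   ("Your lungs".toList, "The patient's lungs".toList),
   ("you have".toList, "the patient has".toList),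
   ("You have".toList, "The patient has".toList),
   ("you are".toList, "the patient is".toList),
   ("You are".toList, "The patient is".toList),
   ("Great news!".toList, "Findings:".toList),
   ("Good news!".toList, "Findings:".toList),
   ("I recommend".toList, "It is recommended".toList),
   ("I suggest".toList, "It is suggested".toList)]

-- one left-to-right pass of `pattern.sub`: at each position try the alternatives in order
-- (the alternation regex of Source B); on a match emit the replacement and skip the match,
-- else emit the character.  fuel = number of remaining scan steps (≥ remaining length).
def pvScanGo (ps : List (List Char × List Char)) : Nat → List Char → List Char
  | 0, t => t
  | _ + 1, [] => []
  | fuel + 1, c :: r =>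
    match ps.find? (fun p => p.1.isPrefixOf (c :: r)) with
    | some (o, n) => n ++ pvScanGo ps fuel (r.drop (o.length - 1))
    | none => c :: pvScanGo ps fuel r

def make_clinical_py_alt (text : String) : String :=
  String.ofList (pvScanGo pvPairsAlt text.toList.length text.toList)

-- ===== PRECONDITION & SPEC =====
-- On texts containing "I sugges" immediately followed by one of the five phrases below, A's
-- later "I suggest" pass re-replaces text produced by an earlier replacement (sequential
-- chaining), while B replaces only phrases of the input; B's value is the intended one.
def D_make_clinical_py (text : String) : Prop :=
  PySem.Str.isIn "I suggesyou need" text = true ∨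
  PySem.Str.isIn "I suggesyour doctor" text = true ∨
  PySem.Str.isIn "I suggesyour lungs" text = true ∨
  PySem.Str.isIn "I suggesyou have" text = true ∨
  PySem.Str.isIn "I suggesyou are" text = true
instance (text : String) : Decidable (D_make_clinical_py text) := by
  unfold D_make_clinical_py; infer_instance

def Spec_make_clinical_py (text : String) (out : String) : Prop :=
  ¬ D_make_clinical_py text → out = make_clinical_py_alt text
instance (text : String) (out : String) : Decidable (Spec_make_clinical_py text out) := by
  unfold Spec_make_clinical_py; infer_instance

def pvDiffWitness_make_clinical_py : String := "I suggesyou need"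
def pvDiffWitnessOut_make_clinical_py : String × String :=
  ("It is suggestedhe patient requires", "I suggesthe patient requires")

-- ===== CLAIM =====
def Claim_unchanged_make_clinical_py : Prop :=
  ∀ (text : String), Dom_make_clinical_py text →
    Spec_make_clinical_py text (make_clinical_py text)

def Claim_changed_make_clinical_py : Prop :=
  Dom_make_clinical_py (pvDiffWitness_make_clinical_py) ∧
  D_make_clinical_py (pvDiffWitness_make_clinical_py) ∧
  make_clinical_py (pvDiffWitness_make_clinical_py) = pvDiffWitnessOut_make_clinical_py.1 ∧
  make_clinical_py_alt (pvDiffWitness_make_clinical_py) = pvDiffWitnessOut_make_clinical_py.2 ∧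
  pvDiffWitnessOut_make_clinical_py.1 ≠ pvDiffWitnessOut_make_clinical_py.2

def Claim_exact_make_clinical_py : Prop :=
  ∀ (text : String), Dom_make_clinical_py text → D_make_clinical_py text →
    make_clinical_py text ≠ make_clinical_py_alt text

-- ===== LEMMAS AND PROOFS =====

-- prefix-incomparability
def pvInc (a b : List Char) : Prop := ¬ a <+: b ∧ ¬ b <+: a

def pvIncB (a b : List Char) : Bool := !a.isPrefixOf b && !b.isPrefixOf a

lemma pvIsPrefixOf_false (a b : List Char) : a.isPrefixOf b = false ↔ ¬ a <+: b := by
  rw [← List.isPrefixOf_iff_prefix]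
  cases h : a.isPrefixOf b <;> simp

lemma pvIncB_iff (a b : List Char) : pvIncB a b = true ↔ pvInc a b := by
  simp only [pvIncB, pvInc, Bool.and_eq_true, Bool.not_eq_true']
  rw [pvIsPrefixOf_false, pvIsPrefixOf_false]

-- chain-trigger strings as char lists
def pvBadsL : List (List Char) :=
  ["I suggesyou need".toList, "I suggesyour doctor".toList, "I suggesyour lungs".toList,
   "I suggesyou have".toList, "I suggesyou are".toList]

def pvNoBad (t : List Char) : Prop := ∀ b ∈ pvBadsL, ¬ b <:+: t

lemma pvNoBad_drop (t : List Char) (k : Nat) (h : pvNoBad t) : pvNoBad (t.drop k) := by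
  intro b hb hinf
  exact h b hb (hinf.trans (List.drop_suffix k t).isInfix)

-- the effect of one pass `text.replace(old, new)` with old = c :: os, as structural recursion
def pvRep (c : Char) (os n : List Char) : List Char → List Char
  | [] => []
  | d :: r =>
    if (c :: os).isPrefixOf (d :: r) then n ++ pvRep c os n (r.drop os.length)
    else d :: pvRep c os n r
termination_by t => t.length
decreasing_by
  all_goals simp

lemma pvRep_nil (c : Char) (os n : List Char) : pvRep c os n [] = [] := by
  simp [pvRep]

lemma pvRep_cons_pos (c : Char) (os n : List Char) (d : Char) (r : List Char)
    (h : (c :: os) <+: (d :: r)) :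
    pvRep c os n (d :: r) = n ++ pvRep c os n (r.drop os.length) := by
  rw [pvRep]
  simp [List.isPrefixOf_iff_prefix.mpr h]

lemma pvRep_cons_neg (c : Char) (os n : List Char) (d : Char) (r : List Char)
    (h : ¬ (c :: os) <+: (d :: r)) :
    pvRep c os n (d :: r) = d :: pvRep c os n r := by
  rw [pvRep]
  rw [if_neg (by simp [List.isPrefixOf_iff_prefix, h])]

lemma pvRep_pos (c : Char) (os n : List Char) (t : List Char) (h : (c :: os) <+: t) :
    pvRep c os n t = n ++ pvRep c os n (t.drop (os.length + 1)) := by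
  match t with
  | [] => exact absurd (List.eq_nil_of_prefix_nil h) (by simp)
  | d :: r => exact pvRep_cons_pos c os n d r h

-- bridge: PySem's replace (for a nonempty old) is pvRep
lemma pvGo_eq (c : Char) (os n : List Char) :
    ∀ (f : Nat) (t acc : List Char), t.length ≤ f →
      PySem.Chars.replace.go (c :: os) n f t acc = acc.reverse ++ pvRep c os n t := by
  intro f
  induction f with
  | zero =>
    intro t acc h
    have : t = [] := List.eq_nil_of_length_eq_zero (Nat.le_zero.mp h)
    subst this
    rw [PySem.Chars.replace.go]
    simp [pvRep_nil]
  | succ f ih =>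
    intro t acc h
    match t with
    | [] =>
      rw [PySem.Chars.replace.go]
      · simp [pvRep_nil]
      · omega
    | d :: r =>
      by_cases hp : (c :: os) <+: (d :: r)
      · rw [PySem.Chars.replace.go]
        simp only [List.isPrefixOf_iff_prefix.mpr hp, if_true]
        have hlen : ((d :: r).drop ((c :: os)).length).length ≤ f := by
          simp only [List.length_drop, List.length_cons] at *
          omega
        rw [ih _ _ hlen]
        rw [pvRep_cons_pos c os n d r hp]
        simp [List.length_cons]
      · rw [PySem.Chars.replace.go]
        rw [if_neg (by simp [List.isPrefixOf_iff_prefix, hp])]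
        simp only [List.length_cons] at h
        rw [ih r (d :: acc) (by omega)]
        rw [pvRep_cons_neg c os n d r hp]
        simp

lemma pvReplace_eq (c : Char) (os n t : List Char) :
    PySem.Chars.replace t (c :: os) n = pvRep c os n t := by
  rw [PySem.Chars.replace]
  simp only [List.isEmpty_cons, if_false, Bool.false_eq_true]
  rw [pvGo_eq c os n t.length t [] (le_refl _)]
  simp

-- the scan at its canonical fuel
def pvSRun (ps : List (List Char × List Char)) (t : List Char) : List Char :=
  pvScanGo ps t.length t

lemma pvScanGo_nil (ps : List (List Char × List Char)) (f : Nat) : pvScanGo ps f [] = [] := by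
  cases f <;> rfl

lemma pvScanGo_fuel (ps : List (List Char × List Char)) :
    ∀ (f g : Nat) (t : List Char), t.length ≤ f → t.length ≤ g →
      pvScanGo ps f t = pvScanGo ps g t := by
  intro f
  induction f with
  | zero =>
    intro g t hf hg
    have : t = [] := List.eq_nil_of_length_eq_zero (Nat.le_zero.mp hf)
    subst this
    rw [pvScanGo_nil, pvScanGo_nil]
  | succ f ih =>
    intro g t hf hg
    match t with
    | [] => rw [pvScanGo_nil, pvScanGo_nil]
    | c :: r =>
      simp only [List.length_cons] at hf hg
      match g with
      | 0 => omega
      | g + 1 =>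
        rw [pvScanGo, pvScanGo]
        cases hfind : List.find? (fun p => p.1.isPrefixOf (c :: r)) ps with
        | none =>
          rw [ih g r (by omega) (by omega)]
        | some p =>
          obtain ⟨o, nn⟩ := p
          have hd : (r.drop (o.length - 1)).length ≤ r.length := by
            simp [List.length_drop]
          simp only [ih g (r.drop (o.length - 1)) (by omega : (r.drop (o.length - 1)).length ≤ f) (by omega : (r.drop (o.length - 1)).length ≤ g)]


lemma pvSRun_nil (ps : List (List Char × List Char)) : pvSRun ps [] = [] := rfl

lemma pvSRun_pos (ps : List (List Char × List Char)) (t o nn : List Char)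
    (hm : ps.find? (fun p => p.1.isPrefixOf t) = some (o, nn)) (ho : o ≠ []) :
    pvSRun ps t = nn ++ pvSRun ps (t.drop o.length) := by
  have hpre : o <+: t := by
    have h := List.find?_some hm
    simpa [List.isPrefixOf_iff_prefix] using h
  match t with
  | [] =>
    exact absurd (List.eq_nil_of_prefix_nil hpre) ho
  | c :: r =>
    show pvScanGo ps (r.length + 1) (c :: r) = _
    rw [pvScanGo]
    simp only [hm]
    match o, ho with
    | oh :: ot, _ =>
      have h1 : (oh :: ot).length - 1 = ot.length := by simp
      have h2 : (c :: r).drop (oh :: ot).length = r.drop ot.length := by simp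
      rw [h1, h2]
      have : pvScanGo ps r.length (r.drop ot.length) = pvSRun ps (r.drop ot.length) := by
        apply pvScanGo_fuel
        · simp [List.length_drop]
        · exact le_refl _
      rw [this]

lemma pvSRun_neg (ps : List (List Char × List Char)) (c : Char) (r : List Char)
    (hm : ps.find? (fun p => p.1.isPrefixOf (c :: r)) = none) :
    pvSRun ps (c :: r) = c :: pvSRun ps r := by
  show pvScanGo ps (r.length + 1) (c :: r) = _
  rw [pvScanGo]
  simp only [hm]
  rfl

lemma pvSRun_empty (t : List Char) : pvSRun [] t = t := by
  induction t with
  | nil => rfl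
  | cons c r ih =>
    rw [pvSRun_neg [] c r (by simp)]
    rw [ih]

lemma pvPrefix_of_append (a b X : List Char) (h : a <+: b ++ X) : a <+: b ∨ b <+: a :=
  List.prefix_or_prefix_of_prefix h (List.prefix_append b X)

-- no spurious prefix match appears after one replace pass
lemma pvNoFake (c : Char) (os n : List Char) :
    ∀ (N : Nat) (s e : List Char), s.length ≤ N →
      (∀ j, j < e.length →
        pvInc (e.drop j) n ∨ (¬ n <+: e.drop j ∧ ¬ (e.take j ++ (c :: os)) <+: s)) →
      ¬ e <+: s → ¬ e <+: pvRep c os n s := by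
  intro N
  induction N with
  | zero =>
    intro s e hN he hns
    have : s = [] := List.eq_nil_of_length_eq_zero (Nat.le_zero.mp hN)
    subst this
    rw [pvRep_nil]
    intro hcon
    exact hns (by simpa using hcon)
  | succ N ih =>
    intro s e hN he hns
    match s with
    | [] =>
      rw [pvRep_nil]
      intro hcon
      exact hns (by simpa using hcon)
    | d :: r =>
      have hene : e ≠ [] := by
        intro h; subst h; exact hns (List.nil_prefix)
      by_cases hp : (c :: os) <+: (d :: r)
      · rw [pvRep_cons_pos c os n d r hp]
        intro hcon
        have h0 := he 0 (by cases e with | nil => exact absurd rfl hene | cons a b => simp)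
        simp only [List.drop_zero, List.take_zero, List.nil_append] at h0
        rcases h0 with ⟨hn1, hn2⟩ | ⟨hn1, hn2⟩
        · rcases pvPrefix_of_append e n _ hcon with h | h
          · exact hn1 h
          · exact hn2 h
        · exact hn2 hp
      · rw [pvRep_cons_neg c os n d r hp]
        intro hcon
        match e, hene with
        | e0 :: e', _ =>
          rw [List.cons_prefix_cons] at hcon
          obtain ⟨rfl, hcon'⟩ := hcon
          have hns' : ¬ e' <+: r := by
            intro h
            exact hns (List.cons_prefix_cons.mpr ⟨rfl, h⟩)
          refine ih r e' (by simpa using hN) ?_ hns' hcon'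
          intro j hj
          have := he (j + 1) (by simpa using Nat.succ_lt_succ hj)
          simp only [List.drop_succ_cons, List.take_succ_cons] at this
          rcases this with h | ⟨h1, h2⟩
          · exact Or.inl h
          · refine Or.inr ⟨h1, ?_⟩
            intro h
            exact h2 (List.cons_prefix_cons.mpr ⟨rfl, h⟩)

-- a replace pass copies a region free of matches verbatim
lemma pvRep_skip (c : Char) (os n : List Char) :
    ∀ (k : Nat) (t : List Char), k ≤ t.length →
      (∀ j, j < k → ¬ (c :: os) <+: t.drop j) →
      pvRep c os n t = t.take k ++ pvRep c os n (t.drop k) := by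
  intro k
  induction k with
  | zero => intro t _ _; simp
  | succ k ih =>
    intro t hk hj
    match t with
    | [] => simp at hk
    | d :: r =>
      have h0 : ¬ (c :: os) <+: (d :: r) := by simpa using hj 0 (Nat.succ_pos k)
      rw [pvRep_cons_neg c os n d r h0]
      rw [ih r (by simpa using hk) (fun j hjk => by simpa using hj (j + 1) (Nat.succ_lt_succ hjk))]
      simp

-- the scan copies a replacement block verbatim (no key starts inside it)
lemma pvSRun_append (ps : List (List Char × List Char)) :
    ∀ (n X : List Char), (∀ q ∈ ps, ∀ j, j < n.length → pvInc (n.drop j) q.1) →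
      pvSRun ps (n ++ X) = n ++ pvSRun ps X := by
  intro n
  induction n with
  | nil => intro X _; simp
  | cons d n' ih =>
    intro X h
    have hnone : ps.find? (fun p => p.1.isPrefixOf ((d :: n') ++ X)) = none := by
      rw [List.find?_eq_none]
      intro q hq hcon
      rw [List.isPrefixOf_iff_prefix] at hcon
      have h0 := h q hq 0 (by simp)
      simp only [List.drop_zero] at h0
      rcases pvPrefix_of_append q.1 (d :: n') X hcon with hh | hh
      · exact h0.2 hh
      · exact h0.1 hh
    rw [show (d :: n') ++ X = d :: (n' ++ X) by simp] at hnone ⊢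
    rw [pvSRun_neg ps d (n' ++ X) hnone]
    rw [ih X (fun q hq j hjl => by simpa using h q hq (j + 1) (by simpa using Nat.succ_lt_succ hjl))]
    simp

lemma pvFind?_transfer {α : Type} (P Q : α → Bool) :
    ∀ (l : List α) (a : α), l.find? P = some a →
      (∀ x ∈ l, P x = false → Q x = false) → Q a = true → l.find? Q = some a := by
  intro l
  induction l with
  | nil => intro a h; simp at h
  | cons b l' ih =>
    intro a h hgd hQ
    cases hb : P b with
    | true =>
      rw [List.find?_cons_of_pos hb] at h
      obtain rfl := Option.some.inj h
      exact List.find?_cons_of_pos hQ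
    | false =>
      rw [List.find?_cons_of_neg (by simp [hb])] at h
      have hqb : Q b = false := hgd b (by simp) hb
      rw [List.find?_cons_of_neg (by simp [hqb])]
      exact ih a h (fun x hx => hgd x (by simp [hx])) hQ

-- one pass commuted into the simultaneous scan
lemma pvStep (c : Char) (os n : List Char) (ps : List (List Char × List Char))
    (h1 : ∀ q ∈ ps, ∀ m, 0 < m → m < q.1.length → pvInc (q.1.drop m) (c :: os))
    (h2 : ∀ q ∈ ps, ∀ j, j < n.length → pvInc (n.drop j) q.1)
    (h3 : ∀ q ∈ ps, ∀ j, j < q.1.length →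
            pvInc (q.1.drop j) n ∨ (¬ n <+: q.1.drop j ∧ (q.1.take j ++ (c :: os)) ∈ pvBadsL))
    (h5 : ∀ q ∈ ps, q.1 ≠ [])
    (hpw : ps.Pairwise (fun a b => pvInc a.1 b.1)) :
    ∀ (N : Nat) (t : List Char), t.length ≤ N → pvNoBad t →
      pvSRun (((c :: os), n) :: ps) t = pvSRun ps (pvRep c os n t) := by
  intro N
  induction N with
  | zero =>
    intro t hN _
    have : t = [] := List.eq_nil_of_length_eq_zero (Nat.le_zero.mp hN)
    subst this
    rw [pvRep_nil, pvSRun_nil, pvSRun_nil]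
  | succ N ih =>
    intro t hN hNB
    match t with
    | [] => rw [pvRep_nil, pvSRun_nil, pvSRun_nil]
    | d :: r =>
    by_cases hp : (c :: os) <+: (d :: r)
    · -- the head pair matches here
      have hfind : (((c :: os), n) :: ps).find?
          (fun p => p.1.isPrefixOf (d :: r)) = some ((c :: os), n) :=
        List.find?_cons_of_pos (List.isPrefixOf_iff_prefix.mpr hp)
      rw [pvSRun_pos _ _ _ _ hfind (by simp)]
      rw [pvRep_pos c os n (d :: r) hp]
      rw [pvSRun_append ps n _ h2]
      have hlen : ((d :: r).drop ((c :: os)).length).length ≤ N := by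
        simp only [List.length_drop, List.length_cons] at hN ⊢
        omega
    -- ((c::os)).length = os.length + 1
      have := ih ((d :: r).drop (os.length + 1)) (by simpa [List.length_cons] using hlen)
        (pvNoBad_drop _ _ hNB)
      simp only [List.length_cons]
      rw [this]
    · -- head does not match
      have hnb : ((c :: os)).isPrefixOf (d :: r) = false := (pvIsPrefixOf_false _ _).mpr hp
      cases hm : ps.find? (fun p => p.1.isPrefixOf (d :: r)) with
      | some qp =>
        obtain ⟨q, nq⟩ := qp
        have hq : q <+: (d :: r) := by
          have h := List.find?_some hm
          simpa [List.isPrefixOf_iff_prefix] using h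
        have hmem : (q, nq) ∈ ps := List.mem_of_find?_eq_some hm
        have hqne : q ≠ [] := h5 (q, nq) hmem
        have hfind : (((c :: os), n) :: ps).find?
            (fun p => p.1.isPrefixOf (d :: r)) = some (q, nq) := by
          rw [List.find?_cons_of_neg (by simp [hnb])]
          exact hm
        rw [pvSRun_pos _ _ _ _ hfind hqne]
        -- right side: the replace pass copies the q-match verbatim
        have hskip : ∀ j, j < q.length → ¬ (c :: os) <+: (d :: r).drop j := by
          intro j hj hcon
          match j with
          | 0 => exact hp (by simpa using hcon)
          | j + 1 =>
            have hqd : q.drop (j + 1) <+: (d :: r).drop (j + 1) := hq.drop (j + 1)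
            rcases List.prefix_or_prefix_of_prefix hqd hcon with hh | hh
            · exact (h1 (q, nq) hmem (j + 1) (Nat.succ_pos j) hj).1 hh
            · exact (h1 (q, nq) hmem (j + 1) (Nat.succ_pos j) hj).2 hh
        have hrep : pvRep c os n (d :: r)
            = q ++ pvRep c os n ((d :: r).drop q.length) := by
          rw [pvRep_skip c os n q.length (d :: r) hq.length_le hskip]
          congr 1
          exact (List.prefix_iff_eq_take.mp hq).symm
        rw [hrep]
        have hfind2 : ps.find?
            (fun p => p.1.isPrefixOf (q ++ pvRep c os n ((d :: r).drop q.length)))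
            = some (q, nq) := by
          apply pvFind?_transfer _ _ ps (q, nq) hm _
            (List.isPrefixOf_iff_prefix.mpr (List.prefix_append _ _))
          intro x hx hPx
          have hPx' : ¬ x.1 <+: (d :: r) := (pvIsPrefixOf_false _ _).mp hPx
          show x.1.isPrefixOf _ = false
          rw [pvIsPrefixOf_false]
          intro hcon
          rcases pvPrefix_of_append x.1 q _ hcon with hh | hh
          · exact hPx' (hh.trans hq)
          · by_cases hxq : x = (q, nq)
            · subst hxq; exact hPx' hq
            · exact (hpw.forall (fun a b h => ⟨h.2, h.1⟩) hx hmem hxq).2 hh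
        rw [pvSRun_pos ps _ q nq hfind2 hqne]
        rw [List.drop_left]
        have hlq : 1 ≤ q.length := by
          cases q with | nil => exact absurd rfl hqne | cons _ _ => simp
        have := ih ((d :: r).drop q.length)
          (by simp only [List.length_drop, List.length_cons] at *; omega)
          (pvNoBad_drop _ _ hNB)
        rw [this]
      | none =>
        have hfind : (((c :: os), n) :: ps).find?
            (fun p => p.1.isPrefixOf (d :: r)) = none := by
          rw [List.find?_cons_of_neg (by simp [hnb])]
          exact hm
        rw [pvSRun_neg _ d r hfind]
        rw [pvRep_cons_neg c os n d r hp]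
        have hnone2 : ps.find? (fun p => p.1.isPrefixOf (d :: pvRep c os n r)) = none := by
          rw [List.find?_eq_none]
          intro x hx hcon
          rw [List.isPrefixOf_iff_prefix] at hcon
          have hnf : ¬ x.1 <+: pvRep c os n (d :: r) := by
            apply pvNoFake c os n (d :: r).length (d :: r) x.1 (le_refl _)
            · intro j hj
              rcases h3 x hx j hj with h | ⟨ha, hb⟩
              · exact Or.inl h
              · refine Or.inr ⟨ha, ?_⟩
                intro hpre
                exact hNB _ hb hpre.isInfix
            · have := List.find?_eq_none.mp hm x hx
              simpa [List.isPrefixOf_iff_prefix] using this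
          rw [pvRep_cons_neg c os n d r hp] at hnf
          exact hnf hcon
        rw [pvSRun_neg ps d _ hnone2]
        have := ih r (by simp only [List.length_cons] at hN; omega)
          (fun b hb hinf => hNB b hb (hinf.trans (List.suffix_cons d r).isInfix))
        rw [this]

-- a replace pass cannot create a chain-trigger occurrence
lemma pvPreserve (c : Char) (os n : List Char) (b : List Char) (hb : b ≠ [])
    (ha : ∀ j, j < n.length → pvInc (n.drop j) b)
    (hbb : ∀ j, j < b.length → pvInc (b.drop j) n) :
    ∀ (N : Nat) (t : List Char), t.length ≤ N → ¬ b <:+: t → ¬ b <:+: pvRep c os n t := by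
  intro N
  induction N with
  | zero =>
    intro t hN h
    have : t = [] := List.eq_nil_of_length_eq_zero (Nat.le_zero.mp hN)
    subst this
    rw [pvRep_nil]
    intro hcon
    exact hb (List.eq_nil_of_infix_nil hcon)
  | succ N ih =>
    intro t hN h
    match t with
    | [] =>
      rw [pvRep_nil]
      intro hcon
      exact hb (List.eq_nil_of_infix_nil hcon)
    | d :: r =>
      by_cases hp : (c :: os) <+: (d :: r)
      · rw [pvRep_pos c os n (d :: r) hp]
        intro hcon
        have hex : ∃ j, b <+: (n ++ pvRep c os n ((d :: r).drop (os.length + 1))).drop j :=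
          (PySem.Chars.exists_prefix_drop_iff_isIn _ _).mpr
            ((PySem.Chars.isIn_iff_infix _ _).mpr hcon)
        obtain ⟨j, hj⟩ := hex
        by_cases hjn : j < n.length
        · rw [List.drop_append_of_le_length (Nat.le_of_lt hjn)] at hj
          rcases pvPrefix_of_append b (n.drop j) _ hj with hh | hh
          · exact (ha j hjn).2 hh
          · exact (ha j hjn).1 hh
        · have : (n ++ pvRep c os n ((d :: r).drop (os.length + 1))).drop j
              = (pvRep c os n ((d :: r).drop (os.length + 1))).drop (j - n.length) := by
            rw [List.drop_append]
            rw [List.drop_eq_nil_of_le (by omega)]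
            simp
          rw [this] at hj
          have hinf : b <:+: pvRep c os n ((d :: r).drop (os.length + 1)) :=
            hj.isInfix.trans (List.drop_suffix _ _).isInfix
          have hlen : ((d :: r).drop (os.length + 1)).length ≤ N := by
            simp [List.length_drop] at *; omega
          exact ih _ hlen
            (fun hc => h (hc.trans (List.drop_suffix _ _).isInfix)) hinf
      · rw [pvRep_cons_neg c os n d r hp]
        intro hcon
        have hex : ∃ j, b <+: (d :: pvRep c os n r).drop j :=
          (PySem.Chars.exists_prefix_drop_iff_isIn _ _).mpr
            ((PySem.Chars.isIn_iff_infix _ _).mpr hcon)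
        obtain ⟨j, hj⟩ := hex
        match j with
        | 0 =>
          simp only [List.drop_zero] at hj
          have hnf : ¬ b <+: pvRep c os n (d :: r) := by
            apply pvNoFake c os n (d :: r).length (d :: r) b (le_refl _)
            · intro j hjb
              exact Or.inl (hbb j hjb)
            · intro hpre
              exact h hpre.isInfix
          rw [pvRep_cons_neg c os n d r hp] at hnf
          exact hnf hj
        | j + 1 =>
          simp only [List.drop_succ_cons] at hj
          have hinf : b <:+: pvRep c os n r :=
            hj.isInfix.trans (List.drop_suffix _ _).isInfix
          exact ih r (by simp only [List.length_cons] at hN; omega)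
            (fun hc => h (hc.trans (List.suffix_cons d r).isInfix)) hinf

-- decidable bundle of all static side conditions, checked once on the literal table
def pvCondB (o n : List Char) (ps : List (List Char × List Char)) : Bool :=
  ps.all fun q =>
    (!q.1.isEmpty) &&
    ((List.range q.1.length).all fun m => (m == 0) || pvIncB (q.1.drop m) o) &&
    ((List.range n.length).all fun j => pvIncB (n.drop j) q.1) &&
    ((List.range q.1.length).all fun j =>
        pvIncB (q.1.drop j) n ||
          (!(n.isPrefixOf (q.1.drop j)) && pvBadsL.contains (q.1.take j ++ o)))

def pvPreserveCondB (n : List Char) : Bool :=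
  pvBadsL.all fun b =>
    (!b.isEmpty) &&
    ((List.range n.length).all fun j => pvIncB (n.drop j) b) &&
    ((List.range b.length).all fun j => pvIncB (b.drop j) n)

def pvPairwiseB : List (List Char × List Char) → Bool
  | [] => true
  | p :: ps => ps.all (fun q => pvIncB p.1 q.1) && pvPairwiseB ps

lemma pvPairwiseB_sound :
    ∀ ps, pvPairwiseB ps = true → ps.Pairwise (fun a b => pvInc a.1 b.1) := by
  intro ps
  induction ps with
  | nil => intro _; exact List.Pairwise.nil
  | cons p ps ih =>
    intro h
    rw [pvPairwiseB, Bool.and_eq_true] at h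
    refine List.Pairwise.cons ?_ (ih h.2)
    intro q hq
    exact (pvIncB_iff _ _).mp (List.all_eq_true.mp h.1 q hq)

def pvGoodB : List (List Char × List Char) → Bool
  | [] => true
  | p :: ps => !p.1.isEmpty && pvCondB p.1 p.2 ps && pvPreserveCondB p.2 && pvGoodB ps

-- the sequential passes equal the simultaneous scan on chain-free text
lemma pvMain :
    ∀ (ps : List (List Char × List Char)), pvGoodB ps = true →
      ps.Pairwise (fun a b => pvInc a.1 b.1) →
      ∀ (t : List Char), pvNoBad t →
        ps.foldl (fun t p => PySem.Chars.replace t p.1 p.2) t = pvSRun ps t := by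
  intro ps
  induction ps with
  | nil =>
    intro _ _ t _
    rw [pvSRun_empty]
    rfl
  | cons p ps ih =>
    obtain ⟨p1, p2⟩ := p
    intro hg hpw t hNB
    rw [pvGoodB] at hg
    simp only [Bool.and_eq_true] at hg
    obtain ⟨⟨⟨hne, hcond⟩, hpres⟩, htail⟩ := hg
    obtain ⟨c, os, hp1⟩ : ∃ c os, p1 = c :: os := by
      cases hp : p1 with
      | nil => rw [hp] at hne; simp at hne
      | cons c os => exact ⟨c, os, rfl⟩
    subst hp1
    simp only [List.foldl_cons]
    rw [pvReplace_eq c os p2 t]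
    -- unpack the per-pair conditions
    rw [pvCondB] at hcond
    simp only [List.all_eq_true, Bool.and_eq_true, Bool.or_eq_true, List.mem_range,
      beq_iff_eq, Bool.not_eq_eq_eq_not, Bool.not_true, List.isEmpty_eq_false_iff,
      pvIncB_iff] at hcond
    have h1 : ∀ q ∈ ps, ∀ m, 0 < m → m < q.1.length → pvInc (q.1.drop m) (c :: os) := by
      intro q hq m hm hml
      rcases (hcond q hq).1.1.2 m hml with h | h
      · omega
      · exact h
    have h2 : ∀ q ∈ ps, ∀ j, j < p2.length → pvInc (p2.drop j) q.1 := by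
      intro q hq j hj
      exact (hcond q hq).1.2 j hj
    have h3 : ∀ q ∈ ps, ∀ j, j < q.1.length →
        pvInc (q.1.drop j) p2 ∨
          (¬ p2 <+: q.1.drop j ∧ (q.1.take j ++ (c :: os)) ∈ pvBadsL) := by
      intro q hq j hj
      rcases (hcond q hq).2 j hj with h | ⟨ha, hb⟩
      · exact Or.inl h
      · refine Or.inr ⟨?_, ?_⟩
        · exact (pvIsPrefixOf_false _ _).mp ha
        · simpa [List.contains_eq_mem] using hb
    have h5 : ∀ q ∈ ps, q.1 ≠ [] := by
      intro q hq
      exact (hcond q hq).1.1.1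
    -- chain-freeness survives the pass
    have hNB' : pvNoBad (pvRep c os p2 t) := by
      rw [pvPreserveCondB] at hpres
      simp only [List.all_eq_true, Bool.and_eq_true, List.mem_range,
        Bool.not_eq_eq_eq_not, Bool.not_true, List.isEmpty_eq_false_iff, pvIncB_iff] at hpres
      intro b hb
      exact pvPreserve c os p2 b (hpres b hb).1.1
        (fun j hj => (hpres b hb).1.2 j hj)
        (fun j hj => (hpres b hb).2 j hj)
        t.length t (le_refl _) (hNB b hb)
    rw [ih htail (List.Pairwise.of_cons hpw) (pvRep c os p2 t) hNB']
    have hstep := pvStep c os p2 ps h1 h2 h3 h5 (List.Pairwise.of_cons hpw)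
      t.length t (le_refl _) hNB
    rw [← hstep]

-- string-level bridge for A's foldl of replaces
lemma pvFoldl_toList :
    ∀ (l : List (String × String)) (s : String),
      (l.foldl (fun t p => PySem.Str.replace t p.1 p.2) s).toList
        = (l.map (fun p => (p.1.toList, p.2.toList))).foldl
            (fun t p => PySem.Chars.replace t p.1 p.2) s.toList := by
  intro l
  induction l with
  | nil => intro s; rfl
  | cons p l ih =>
    intro s
    simp only [List.foldl_cons, List.map_cons]
    rw [ih]
    rw [PySem.Str.toList_replace]

lemma pvPairsAlt_eq :
    pvPairsAlt = pvPairs.map (fun p => (p.1.toList, p.2.toList)) := by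
  decide

def pvAllIncDropB (m : Nat) (w : List Char) (ks : List (List Char × List Char)) : Bool :=
  ks.all fun q => (List.range m).all fun i => pvIncB (w.drop i) q.1

def pvC3B (w : List Char) (ks : List (List Char × List Char)) : Bool :=
  ks.all fun q => (List.range q.1.length).all fun u => (u == 0) || pvIncB (q.1.drop u) w

def pvGoneB (o n : List Char) : Bool :=
  ((List.range n.length).all fun j => pvIncB (n.drop j) o) &&
  ((List.range o.length).all fun j => pvIncB (o.drop j) n)

-- ── tightness: A ≠ B everywhere inside D_ ──
-- A's final pass leaves no occurrence of its key and creates none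
lemma pvGone (c : Char) (os n : List Char)
    (ha : ∀ j, j < n.length → pvInc (n.drop j) (c :: os))
    (hb2 : ∀ j, j < (c :: os).length → pvInc ((c :: os).drop j) n) :
    ∀ (N : Nat) (s : List Char), s.length ≤ N → ¬ (c :: os) <:+: pvRep c os n s := by
  intro N
  induction N with
  | zero =>
    intro s hN hcon
    have : s = [] := List.eq_nil_of_length_eq_zero (Nat.le_zero.mp hN)
    subst this
    rw [pvRep_nil] at hcon
    exact absurd (List.eq_nil_of_infix_nil hcon) (by simp)
  | succ N ih =>
    intro s hN hcon
    match s with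
    | [] =>
      rw [pvRep_nil] at hcon
      exact absurd (List.eq_nil_of_infix_nil hcon) (by simp)
    | d :: r =>
      by_cases hp : (c :: os) <+: (d :: r)
      · rw [pvRep_pos c os n (d :: r) hp] at hcon
        obtain ⟨j, hj⟩ := (PySem.Chars.exists_prefix_drop_iff_isIn _ _).mpr
          ((PySem.Chars.isIn_iff_infix _ _).mpr hcon)
        by_cases hjn : j < n.length
        · rw [List.drop_append_of_le_length (Nat.le_of_lt hjn)] at hj
          rcases pvPrefix_of_append _ _ _ hj with hh | hh
          · exact (ha j hjn).2 hh
          · exact (ha j hjn).1 hh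
        · rw [List.drop_append] at hj
          rw [List.drop_eq_nil_of_le (by omega)] at hj
          simp only [List.nil_append] at hj
          have hinf : (c :: os) <:+: pvRep c os n ((d :: r).drop (os.length + 1)) :=
            hj.isInfix.trans (List.drop_suffix _ _).isInfix
          exact ih _ (by simp only [List.length_drop, List.length_cons] at hN ⊢; omega) hinf
      · rw [pvRep_cons_neg c os n d r hp] at hcon
        rcases List.infix_cons_iff.mp hcon with hh | hh
        · have hnf : ¬ (c :: os) <+: pvRep c os n (d :: r) := by
            apply pvNoFake c os n (d :: r).length (d :: r) (c :: os) (le_refl _)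
            · intro j hj
              exact Or.inl (hb2 j hj)
            · exact hp
          rw [pvRep_cons_neg c os n d r hp] at hnf
          exact hnf hh
        · exact ih r (by simp only [List.length_cons] at hN; omega) hh

-- the first pair whose key matches an own-key-prefixed text is that pair
lemma pvFindSelf :
    ∀ (ps : List (List Char × List Char)) (o n' X : List Char),
      ps.Pairwise (fun a b => pvInc a.1 b.1) → (o, n') ∈ ps →
      ps.find? (fun p => p.1.isPrefixOf (o ++ X)) = some (o, n') := by
  intro ps
  induction ps with
  | nil => intro o n' X _ hmem; simp at hmem
  | cons y ys ih =>
    intro o n' X hpw hmem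
    rcases List.mem_cons.mp hmem with rfl | hmem'
    · exact List.find?_cons_of_pos
        (List.isPrefixOf_iff_prefix.mpr (List.prefix_append _ _))
    · have hrel : pvInc y.1 o := (List.pairwise_cons.mp hpw).1 (o, n') hmem'
      rw [List.find?_cons_of_neg]
      · exact ih o n' X (List.Pairwise.of_cons hpw) hmem'
      · simp only [List.isPrefixOf_iff_prefix, Bool.not_eq_true, decide_eq_true_eq]
        intro hcon
        rcases pvPrefix_of_append _ _ _ hcon with hh | hh
        · exact hrel.1 hh
        · exact hrel.2 hh

-- the scan copies a match-free prefix, then substitutes the key that follows it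
lemma pvScanHit (ps : List (List Char × List Char)) (o n' : List Char)
    (hpw : ps.Pairwise (fun a b => pvInc a.1 b.1)) (hmem : (o, n') ∈ ps) (ho : o ≠ []) :
    ∀ (pre X : List Char),
      (∀ q ∈ ps, ∀ i, i < pre.length → pvInc ((pre ++ o).drop i) q.1) →
      ∃ Y, pvSRun ps (pre ++ o ++ X) = pre ++ n' ++ Y := by
  intro pre
  induction pre with
  | nil =>
    intro X _
    refine ⟨pvSRun ps ((o ++ X).drop o.length), ?_⟩
    simp only [List.nil_append]
    rw [pvSRun_pos ps (o ++ X) o n' (pvFindSelf ps o n' X hpw hmem) ho]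
  | cons d pre' ih =>
    intro X hC1
    have hnone : ps.find? (fun p => p.1.isPrefixOf ((d :: pre') ++ o ++ X)) = none := by
      rw [List.find?_eq_none]
      intro q hq hcon
      rw [List.isPrefixOf_iff_prefix] at hcon
      have h0 := hC1 q hq 0 (by simp)
      simp only [List.drop_zero] at h0
      rw [show (d :: pre') ++ o ++ X = ((d :: pre') ++ o) ++ X by simp] at hcon
      rcases pvPrefix_of_append _ _ _ hcon with hh | hh
      · exact h0.2 hh
      · exact h0.1 hh
    rw [show (d :: pre') ++ o ++ X = d :: (pre' ++ o ++ X) by simp] at hnone ⊢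
    rw [pvSRun_neg ps d _ hnone]
    obtain ⟨Y, hY⟩ := ih X (fun q hq i hi => by
      simpa using hC1 q hq (i + 1) (by simpa using Nat.succ_lt_succ hi))
    exact ⟨Y, by rw [hY]; simp⟩

-- inside D_, the scan's output contains the chained phrase that A's last pass rewrites
lemma pvBadHit (ps : List (List Char × List Char)) (o n' k16 pre : List Char)
    (hpw : ps.Pairwise (fun a b => pvInc a.1 b.1)) (hmem : (o, n') ∈ ps)
    (h5 : ∀ q ∈ ps, q.1 ≠ [])
    (hC1 : ∀ q ∈ ps, ∀ i, i < pre.length → pvInc ((pre ++ o).drop i) q.1)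
    (hC3 : ∀ q ∈ ps, ∀ u, 0 < u → u < q.1.length → pvInc (q.1.drop u) (pre ++ o))
    (hk : k16 <+: pre ++ n') :
    ∀ (N : Nat) (t : List Char), t.length ≤ N → (pre ++ o) <:+: t →
      k16 <:+: pvSRun ps t := by
  have ho : o ≠ [] := h5 (o, n') hmem
  intro N
  induction N with
  | zero =>
    intro t hN hinf
    have : t = [] := List.eq_nil_of_length_eq_zero (Nat.le_zero.mp hN)
    subst this
    have := List.eq_nil_of_infix_nil hinf
    exact absurd (List.append_eq_nil_iff.mp this).2 ho
  | succ N ih =>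
    intro t hN hinf
    by_cases hpre : (pre ++ o) <+: t
    · obtain ⟨X, hX⟩ := hpre
      obtain ⟨Y, hY⟩ := pvScanHit ps o n' hpw hmem ho pre X hC1
      rw [show pre ++ o ++ X = (pre ++ o) ++ X by simp, hX] at hY
      rw [hY]
      refine List.IsPrefix.isInfix ?_
      exact hk.trans (List.prefix_append _ _)
    · match t with
      | [] =>
        have := List.eq_nil_of_infix_nil hinf
        exact absurd (List.append_eq_nil_iff.mp this).2 ho
      | d :: r =>
        have hinfr : (pre ++ o) <:+: r := by
          rcases List.infix_cons_iff.mp hinf with hh | hh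
          · exact absurd hh hpre
          · exact hh
        cases hm : ps.find? (fun p => p.1.isPrefixOf (d :: r)) with
        | none =>
          rw [pvSRun_neg ps d r hm]
          exact List.infix_cons (ih r (by simp only [List.length_cons] at hN; omega) hinfr)
        | some qp =>
          obtain ⟨q, nq⟩ := qp
          have hq : q <+: (d :: r) := by
            have h := List.find?_some hm
            simpa [List.isPrefixOf_iff_prefix] using h
          have hqmem : (q, nq) ∈ ps := List.mem_of_find?_eq_some hm
          have hqne : q ≠ [] := h5 (q, nq) hqmem
          rw [pvSRun_pos ps (d :: r) q nq hm hqne]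
          -- the chain occurrence lies beyond the replaced match
          obtain ⟨u', hu'⟩ := (PySem.Chars.exists_prefix_drop_iff_isIn _ _).mpr
            ((PySem.Chars.isIn_iff_infix _ _).mpr hinfr)
          have hu : (pre ++ o) <+: (d :: r).drop (u' + 1) := by simpa using hu'
          have hge : q.length ≤ u' + 1 := by
            by_contra hlt
            have h1 : q.drop (u' + 1) <+: (d :: r).drop (u' + 1) := hq.drop (u' + 1)
            rcases List.prefix_or_prefix_of_prefix h1 hu with hh | hh
            · exact (hC3 (q, nq) hqmem (u' + 1) (Nat.succ_pos u')
                (by show u' + 1 < q.length; omega)).1 hh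
            · exact (hC3 (q, nq) hqmem (u' + 1) (Nat.succ_pos u')
                (by show u' + 1 < q.length; omega)).2 hh
          have hinfdrop : (pre ++ o) <:+: (d :: r).drop q.length := by
            have : (d :: r).drop (u' + 1) = ((d :: r).drop q.length).drop (u' + 1 - q.length) := by
              rw [List.drop_drop]
              congr 1
              omega
            rw [this] at hu
            exact hu.isInfix.trans (List.drop_suffix _ _).isInfix
          have hlq : 1 ≤ q.length := by
            cases q with | nil => exact absurd rfl hqne | cons _ _ => simp
          have := ih ((d :: r).drop q.length)
            (by simp only [List.length_drop, List.length_cons] at hN ⊢; omega) hinfdrop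
          exact this.trans (List.suffix_append nq _).isInfix

-- ===== VERDICT =====
theorem make_clinical_py_spec : Claim_unchanged_make_clinical_py := by
  intro text _
  unfold Spec_make_clinical_py
  intro hnd
  have hnb : pvNoBad text.toList := by
    intro b hb hinf
    apply hnd
    unfold D_make_clinical_py
    simp only [pvBadsL, List.mem_cons, List.not_mem_nil, or_false] at hb
    rcases hb with rfl | rfl | rfl | rfl | rfl
    · exact Or.inl (by simpa [PySem.Str.isIn] using (PySem.Chars.isIn_iff_infix _ _).mpr hinf)
    · exact Or.inr (Or.inl (by simpa [PySem.Str.isIn] using (PySem.Chars.isIn_iff_infix _ _).mpr hinf))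
    · exact Or.inr (Or.inr (Or.inl (by simpa [PySem.Str.isIn] using (PySem.Chars.isIn_iff_infix _ _).mpr hinf)))
    · exact Or.inr (Or.inr (Or.inr (Or.inl (by simpa [PySem.Str.isIn] using (PySem.Chars.isIn_iff_infix _ _).mpr hinf))))
    · exact Or.inr (Or.inr (Or.inr (Or.inr (by simpa [PySem.Str.isIn] using (PySem.Chars.isIn_iff_infix _ _).mpr hinf))))
  have hA : (make_clinical_py text).toList
      = pvPairsAlt.foldl (fun t p => PySem.Chars.replace t p.1 p.2) text.toList := by
    rw [make_clinical_py, pvFoldl_toList, ← pvPairsAlt_eq]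
  have hB : (make_clinical_py_alt text).toList = pvSRun pvPairsAlt text.toList := by
    rw [make_clinical_py_alt]
    exact String.toList_ofList
  have hmain := pvMain pvPairsAlt (by decide) (pvPairwiseB_sound _ (by decide)) text.toList hnb
  have : (make_clinical_py text).toList = (make_clinical_py_alt text).toList := by
    rw [hA, hB, hmain]
  calc make_clinical_py text
      = String.ofList (make_clinical_py text).toList := String.ofList_toList.symm
    _ = String.ofList (make_clinical_py_alt text).toList := by rw [this]
    _ = make_clinical_py_alt text := String.ofList_toList

set_option maxRecDepth 8000 in
theorem make_clinical_py_changed : Claim_changed_make_clinical_py := by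
  unfold Claim_changed_make_clinical_py
  decide

theorem make_clinical_py_tight : Claim_exact_make_clinical_py := by
  intro text _ hD heq
  -- A's output, on the list side
  have hA : (make_clinical_py text).toList
      = pvRep 'I' " suggest".toList "It is suggested".toList
          ((pvPairsAlt.take 15).foldl (fun t p => PySem.Chars.replace t p.1 p.2) text.toList) := by
    rw [make_clinical_py, pvFoldl_toList, ← pvPairsAlt_eq]
    rw [show pvPairsAlt = pvPairsAlt.take 15
        ++ [("I suggest".toList, "It is suggested".toList)] by decide]
    rw [List.foldl_append]
    simp only [List.foldl_cons, List.foldl_nil]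
    rw [show ("I suggest".toList : List Char) = 'I' :: " suggest".toList by decide]
    rw [pvReplace_eq]
    rw [show (pvPairsAlt.take 15 ++ [('I' :: " suggest".toList, "It is suggested".toList)]).take 15
        = pvPairsAlt.take 15 by decide]
  -- A's output never contains "I suggest"
  have hgone : ¬ ("I suggest".toList : List Char) <:+: (make_clinical_py text).toList := by
    rw [hA, show ("I suggest".toList : List Char) = 'I' :: " suggest".toList by decide]
    apply pvGone 'I' " suggest".toList "It is suggested".toList ?_ ?_ _ _ (le_refl _)
    · have hb : pvGoneB ('I' :: " suggest".toList) "It is suggested".toList = true := by decide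
      rw [pvGoneB, Bool.and_eq_true] at hb
      intro j hj
      exact (pvIncB_iff _ _).mp
        (List.all_eq_true.mp hb.1 j (List.mem_range.mpr hj))
    · have hb : pvGoneB ('I' :: " suggest".toList) "It is suggested".toList = true := by decide
      rw [pvGoneB, Bool.and_eq_true] at hb
      intro j hj
      exact (pvIncB_iff _ _).mp
        (List.all_eq_true.mp hb.2 j (List.mem_range.mpr hj))
  -- B's output contains "I suggest": dispatch on the five chain triggers
  have hpw : pvPairsAlt.Pairwise (fun a b => pvInc a.1 b.1) := pvPairwiseB_sound _ (by decide)
  have h5 : ∀ q ∈ pvPairsAlt, q.1 ≠ [] := by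
    intro q hq
    have hb : pvPairsAlt.all (fun q => !q.1.isEmpty) = true := by decide
    have := List.all_eq_true.mp hb q hq
    simpa using this
  have hB : (make_clinical_py_alt text).toList = pvSRun pvPairsAlt text.toList :=
    String.toList_ofList
  have hhit : ("I suggest".toList : List Char) <:+: (make_clinical_py_alt text).toList := by
    rw [hB]
    have run : ∀ (o n' : List Char), (o, n') ∈ pvPairsAlt →
        pvAllIncDropB 8 ("I sugges".toList ++ o) pvPairsAlt = true →
        pvC3B ("I sugges".toList ++ o) pvPairsAlt = true →
        ("I suggest".toList : List Char) <+: "I sugges".toList ++ n' →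
        ("I sugges".toList ++ o) <:+: text.toList →
        ("I suggest".toList : List Char) <:+: pvSRun pvPairsAlt text.toList := by
      intro o n' hmem hc1 hc3 hk hinf
      apply pvBadHit pvPairsAlt o n' "I suggest".toList "I sugges".toList hpw hmem h5 ?_ ?_ hk
        text.toList.length text.toList (le_refl _) hinf
      · intro q hq i hi
        rw [pvAllIncDropB] at hc1
        exact (pvIncB_iff _ _).mp (List.all_eq_true.mp (List.all_eq_true.mp hc1 q hq) i
          (List.mem_range.mpr (by simpa using hi)))
      · intro q hq u hu hul
        rw [pvC3B] at hc3
        have := List.all_eq_true.mp (List.all_eq_true.mp hc3 q hq) u (List.mem_range.mpr hul)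
        simp only [Bool.or_eq_true] at this
        rcases this with h | h
        · exact absurd (by simpa using h) (by omega)
        · exact (pvIncB_iff _ _).mp h
    unfold D_make_clinical_py at hD
    rcases hD with h | h | h | h | h <;> [
      exact run "you need".toList "the patient requires".toList (by decide) (by decide)
        (by decide) (by decide)
        (by simpa [PySem.Str.isIn, show ("I suggesyou need".toList : List Char)
          = "I sugges".toList ++ "you need".toList by decide]
          using (PySem.Chars.isIn_iff_infix _ _).mp (by simpa [PySem.Str.isIn] using h));
      exact run "your doctor".toList "the treating physician".toList (by decide) (by decide)
        (by decide) (by decide)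
        (by simpa [PySem.Str.isIn, show ("I suggesyour doctor".toList : List Char)
          = "I sugges".toList ++ "your doctor".toList by decide]
          using (PySem.Chars.isIn_iff_infix _ _).mp (by simpa [PySem.Str.isIn] using h));
      exact run "your lungs".toList "the patient's lungs".toList (by decide) (by decide)
        (by decide) (by decide)
        (by simpa [PySem.Str.isIn, show ("I suggesyour lungs".toList : List Char)
          = "I sugges".toList ++ "your lungs".toList by decide]
          using (PySem.Chars.isIn_iff_infix _ _).mp (by simpa [PySem.Str.isIn] using h));
      exact run "you have".toList "the patient has".toList (by decide) (by decide)
        (by decide) (by decide)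
        (by simpa [PySem.Str.isIn, show ("I suggesyou have".toList : List Char)
          = "I sugges".toList ++ "you have".toList by decide]
          using (PySem.Chars.isIn_iff_infix _ _).mp (by simpa [PySem.Str.isIn] using h));
      exact run "you are".toList "the patient is".toList (by decide) (by decide)
        (by decide) (by decide)
        (by simpa [PySem.Str.isIn, show ("I suggesyou are".toList : List Char)
          = "I sugges".toList ++ "you are".toList by decide]
          using (PySem.Chars.isIn_iff_infix _ _).mp (by simpa [PySem.Str.isIn] using h))]
  rw [heq] at hgone
  exact hgone hhit
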